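-- pv_equiv track=rewrite | github.com/joaquimrcarvalho/cipf-comtrade | comtradetools.py | get_year_intervals
-- ===== SOURCE A (Python) =====
-- def get_year_intervals(years):
--     """Converts a list of years to a list of year intervals
--     e.g. [2018,2019,2020] -> ['2018-2020']
--     e.g. [2018,2019,2021] -> ['2018-2019','2021-2021']
--     """
--     intervals = []
--     start_year = years[0]
--     end_year = years[0]
--
--     for year in years[1:]:
--         if year == end_year + 1:
--             end_year = year
--         else:
--             intervals.append(f"{start_year}-{end_year}")
--             start_year = year
--             end_year = year
--
--     intervals.append(f"{start_year}-{end_year}")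
--     return intervals
-- ===== SOURCE B (Python) =====
-- def get_year_intervals(years):
--     # collect (start, end) run pairs scanning right-to-left, merging a year
--     # into the following run when it is its immediate predecessor
--     runs = []
--     for y in reversed(years):
--         if runs and runs[-1][0] == y + 1:
--             runs[-1] = (y, runs[-1][1])
--         else:
--             runs.append((y, y))
--     runs.reverse()
--     return [f"{s}-{e}" for s, e in runs]
-- ===== Notes on version B (the rewrite author's own statement) =====
-- stated objective: alternative
-- what changed: B scans the list right-to-left, folding each year into a list of (start,end) run pairs by merging it with the following run when consecutive, then formats the pairs, instead of A's left-to-right loop with start/end bookkeeping that appends formatted strings at run breaks.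
import Mathlib
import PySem

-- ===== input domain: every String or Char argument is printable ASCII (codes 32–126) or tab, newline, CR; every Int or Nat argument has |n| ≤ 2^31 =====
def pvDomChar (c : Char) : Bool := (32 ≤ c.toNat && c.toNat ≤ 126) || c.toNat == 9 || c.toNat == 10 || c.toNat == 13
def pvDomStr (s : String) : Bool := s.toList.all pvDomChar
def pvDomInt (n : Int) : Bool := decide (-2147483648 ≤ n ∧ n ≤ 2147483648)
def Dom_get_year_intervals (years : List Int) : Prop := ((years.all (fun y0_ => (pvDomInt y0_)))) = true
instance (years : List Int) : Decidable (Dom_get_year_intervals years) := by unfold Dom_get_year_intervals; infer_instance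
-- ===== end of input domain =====

-- ===== PORT A =====
-- B folds right-to-left into (start,end) run pairs instead of A's left-to-right start/end bookkeeping; return values proved equal on nonempty lists (A raises IndexError on []).
def pvFmt (s e : Int) : String := PySem.Int.toStr s ++ "-" ++ PySem.Int.toStr e

def get_year_intervals (years : List Int) : List String :=
  match years with
  | [] => []  -- Python A raises IndexError (years[0]) here; excluded by Pre_
  | y0 :: rest =>
    let st := rest.foldl
      (fun (acc : List String × Int × Int) year =>
        if year = acc.2.2 + 1 then (acc.1, acc.2.1, year)
        else (acc.1 ++ [pvFmt acc.2.1 acc.2.2], year, year))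
      ([], y0, y0);
    st.1 ++ [pvFmt st.2.1 st.2.2]

-- ===== PORT B =====
-- B's reversed-iteration loop that appends/merges at the back and finally reverses
-- is exactly a foldr that conses/merges at the front; ported as such.
def pvStep (y : Int) (runs : List (Int × Int)) : List (Int × Int) :=
  match runs with
  | (s, e) :: rs => if s = y + 1 then (y, e) :: rs else (y, y) :: (s, e) :: rs
  | [] => [(y, y)]

def get_year_intervals_alt (years : List Int) : List String :=
  (years.foldr pvStep []).map (fun p => pvFmt p.1 p.2)

-- ===== PRECONDITION & SPEC =====
-- Pre_ excludes exactly the empty list, on which A raises IndexError.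
def Pre_get_year_intervals (years : List Int) : Prop := years ≠ []
instance (years : List Int) : Decidable (Pre_get_year_intervals years) := by unfold Pre_get_year_intervals; infer_instance
def pvWitness_get_year_intervals : List Int := ([2018, 2019, 2021])
def Spec_get_year_intervals (years : List Int) (out : List String) : Prop := out = get_year_intervals_alt years
instance (years : List Int) (out : List String) : Decidable (Spec_get_year_intervals years out) := by unfold Spec_get_year_intervals; infer_instance

-- ===== CLAIM (what is proved, stated in full; the proofs are below) =====
def Claim_equal_get_year_intervals : Prop := ∀ (years : List Int), Dom_get_year_intervals years → Pre_get_year_intervals years → Spec_get_year_intervals years (get_year_intervals years)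

-- ===== LEMMAS AND PROOFS =====
-- Characterization of A's loop: the runs of ys continued from a current run (s, e).
def pvRuns : List Int → Int → Int → List String
  | [], s, e => [pvFmt s e]
  | y :: rest, s, e =>
    if y = e + 1 then pvRuns rest s y
    else pvFmt s e :: pvRuns rest y y

theorem pvFoldl_eq_runs (rest : List Int) (acc : List String) (s e : Int) :
    (let st := rest.foldl
        (fun (acc : List String × Int × Int) year =>
          if year = acc.2.2 + 1 then (acc.1, acc.2.1, year)
          else (acc.1 ++ [pvFmt acc.2.1 acc.2.2], year, year))
        (acc, s, e);
      st.1 ++ [pvFmt st.2.1 st.2.2]) = acc ++ pvRuns rest s e := by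
  induction rest generalizing acc s e with
  | nil => simp [pvRuns]
  | cons y rest ih =>
    by_cases h : y = e + 1
    · simp [List.foldl_cons, h, pvRuns, ih]
    · simp [List.foldl_cons, if_neg h, pvRuns, ih, List.append_assoc]

theorem pvStep_ne_nil (y : Int) (rs : List (Int × Int)) : pvStep y rs ≠ [] := by
  cases rs with
  | nil => simp [pvStep]
  | cons p rs => obtain ⟨s, e⟩ := p; simp only [pvStep]; split_ifs <;> simp

theorem pvRuns_eq_foldr (ys : List Int) (s e : Int) :
    pvRuns ys s e =
      match ys.foldr pvStep [] with
      | (a, b) :: rs => if a = e + 1 then pvFmt s b :: rs.map (fun p => pvFmt p.1 p.2)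
                        else pvFmt s e :: ((a, b) :: rs).map (fun p => pvFmt p.1 p.2)
      | [] => [pvFmt s e] := by
  induction ys generalizing s e with
  | nil => simp [pvRuns]
  | cons y ys ih =>
    show pvRuns (y :: ys) s e = _
    rw [List.foldr_cons]
    rcases hys : ys.foldr pvStep [] with _ | ⟨⟨a, b⟩, rs⟩
    · cases ys with
      | nil => by_cases hy : y = e + 1 <;> simp [pvRuns, pvStep, hy]
      | cons z zs =>
        rw [List.foldr_cons] at hys
        exact absurd hys (pvStep_ne_nil z _)
    · by_cases ha : a = y + 1
      · simp only [pvRuns, pvStep, hys, ih, ha]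
        by_cases hy : y = e + 1 <;> simp [hy, List.map_cons]
      · simp only [pvRuns, pvStep, hys, if_neg ha, ih]
        by_cases hy : y = e + 1 <;> simp [hy, List.map_cons]

-- ===== VERDICT (by name: the statement is the Claim_ definition above) =====
theorem get_year_intervals_spec : Claim_equal_get_year_intervals := by
  intro years _ hpre
  unfold Spec_get_year_intervals get_year_intervals get_year_intervals_alt
  match years with
  | [] => exact absurd rfl hpre
  | y0 :: rest =>
    have hA := pvFoldl_eq_runs rest [] y0 y0
    simp only [List.nil_append] at hA
    simp only [hA, pvRuns_eq_foldr rest y0 y0, List.foldr_cons]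
    rcases hrest : rest.foldr pvStep [] with _ | ⟨⟨a, b⟩, rs⟩
    · simp [pvStep]
    · by_cases ha : a = y0 + 1 <;> simp [pvStep, ha, List.map_cons]
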